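-- pv_equiv track=rewrite | github.com/dreamay/Markit | markit/grouping.py | group_by_browser
-- ===== SOURCE A (Python) =====
-- def group_by_browser(bookmarks: list[dict]) -> dict[str, list[dict]]:
--     """按来源浏览器分组。"""
--     groups: dict[str, list[dict]] = {}
--     for bm in bookmarks:
--         browser = bm.get("browser", "其他")
--         groups.setdefault(browser, []).append(bm)
--     for v in groups.values():
--         v.sort(key=lambda b: b["title"].lower())
--     return dict(sorted(groups.items(), key=lambda kv: kv[0]))
-- ===== SOURCE B (Python) =====
-- def group_by_browser(bookmarks: list[dict]) -> dict[str, list[dict]]: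
--     """按来源浏览器分组。"""
--     browsers = sorted({bm.get("browser", "其他") for bm in bookmarks})
--     return {
--         b: sorted(
--             (bm for bm in bookmarks if bm.get("browser", "其他") == b),
--             key=lambda x: x["title"].lower(),
--         )
--         for b in browsers
--     }
-- ===== Notes on version B (the rewrite author's own statement) =====
-- stated objective: alternative
-- what changed: Instead of building a dict incrementally with setdefault/append, sorting each group in place and finally sorting the items, B computes the sorted set of distinct browsers and builds the result directly with one filter-and-sort per browser.
import Mathlib
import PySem

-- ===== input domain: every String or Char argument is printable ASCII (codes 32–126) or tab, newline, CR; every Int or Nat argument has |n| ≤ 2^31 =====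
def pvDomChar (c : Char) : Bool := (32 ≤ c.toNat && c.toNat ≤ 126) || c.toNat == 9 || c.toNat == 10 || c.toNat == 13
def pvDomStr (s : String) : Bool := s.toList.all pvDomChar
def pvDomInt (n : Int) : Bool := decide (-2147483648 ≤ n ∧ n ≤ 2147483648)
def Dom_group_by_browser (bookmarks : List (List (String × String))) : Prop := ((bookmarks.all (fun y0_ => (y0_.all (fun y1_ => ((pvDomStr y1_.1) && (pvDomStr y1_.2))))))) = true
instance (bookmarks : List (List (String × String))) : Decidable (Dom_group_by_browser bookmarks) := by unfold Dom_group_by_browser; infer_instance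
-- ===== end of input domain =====

-- B replaces A's incremental setdefault-dict + per-group in-place sorts + final item sort by
-- one sorted pass over the distinct browsers with a filter-and-sort per browser (objective: alternative).

-- ===== PORT A =====
-- A: build groups dict with setdefault/append, sort each group's list in place by title.lower(),
-- then return dict(sorted(groups.items(), key=lambda kv: kv[0])).
def group_by_browser (bookmarks : List (List (String × String))) : List (String × List (List (String × String))) :=
  let groups : PySem.Dict String (List (List (String × String))) :=
    bookmarks.foldl
      (fun g bm => g.modify ((PySem.Dict.mk bm).getD "browser" "其他") [] (fun v => v ++ [bm]))
      PySem.Dict.empty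
  -- second loop: each group list is sorted in place by title.lower() (b["title"] raises outside Pre_; getD "" there)
  let groups2 : PySem.Dict String (List (List (String × String))) :=
    PySem.Dict.mk (groups.items.map (fun kv =>
      (kv.1, PySem.List.sorted kv.2 (fun b => PySem.Str.lower ((PySem.Dict.mk b).getD "title" "")) false)))
  PySem.List.sorted groups2.items (fun kv => kv.1) false

-- ===== PORT B =====
-- B: sorted distinct browsers, then for each browser filter the bookmarks and sort by title.lower().
def group_by_browser_alt (bookmarks : List (List (String × String))) : List (String × List (List (String × String))) :=
  let browsers : List String :=
    PySem.List.sorted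
      (PySem.Set.ofList (bookmarks.map (fun bm => (PySem.Dict.mk bm).getD "browser" "其他")))
      (fun x => x) false
  browsers.map (fun b =>
    (b, PySem.List.sorted
          (bookmarks.filter (fun bm => (PySem.Dict.mk bm).getD "browser" "其他" == b))
          (fun x => PySem.Str.lower ((PySem.Dict.mk x).getD "title" "")) false))

-- ===== PRECONDITION & SPEC =====
-- Pre_: every bookmark has a "title" key — A's sort key raises KeyError otherwise.
def Pre_group_by_browser (bookmarks : List (List (String × String))) : Prop :=
  (bookmarks.all (fun bm => (PySem.Dict.mk bm).contains "title")) = true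
instance (bookmarks : List (List (String × String))) : Decidable (Pre_group_by_browser bookmarks) := by unfold Pre_group_by_browser; infer_instance
def pvWitness_group_by_browser : (List (List (String × String))) :=
  [[("browser", "Chrome"), ("title", "B")], [("title", "a")]]
def Spec_group_by_browser (bookmarks : List (List (String × String))) (out : List (String × List (List (String × String)))) : Prop := out = group_by_browser_alt bookmarks
instance (bookmarks : List (List (String × String))) (out : List (String × List (List (String × String)))) : Decidable (Spec_group_by_browser bookmarks out) := by unfold Spec_group_by_browser; infer_instance

-- ===== CLAIM (what is proved, stated in full; the proofs are below) =====
def Claim_equal_group_by_browser : Prop := ∀ (bookmarks : List (List (String × String))), Dom_group_by_browser bookmarks → Pre_group_by_browser bookmarks → Spec_group_by_browser bookmarks (group_by_browser bookmarks)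

-- ===== LEMMAS AND PROOFS =====

-- the browser of a bookmark (proof-side abbreviation)
def pvKey (bm : List (String × String)) : String := (PySem.Dict.mk bm).getD "browser" "其他"

-- A's grouping loop, characterised: its items are the distinct browsers in first-occurrence
-- order, each paired with the filter of the bookmarks carrying that browser.
lemma groups_items (bookmarks : List (List (String × String))) :
    (bookmarks.foldl
      (fun (g : PySem.Dict String (List (List (String × String)))) bm =>
        g.modify (pvKey bm) [] (fun v => v ++ [bm]))
      PySem.Dict.empty).items
    = (PySem.Set.ofList (bookmarks.map pvKey)).map
        (fun k => (k, bookmarks.filter (fun bm => pvKey bm == k))) := by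
  set d := bookmarks.foldl
      (fun (g : PySem.Dict String (List (List (String × String)))) bm =>
        g.modify (pvKey bm) [] (fun v => v ++ [bm]))
      PySem.Dict.empty with hd
  have hnd : d.keys.Nodup := by
    rw [hd]; exact PySem.Dict.nodup_keys_foldl_modify_key bookmarks pvKey [] _ _ (by simp)
  have hkeys : d.keys = PySem.Set.ofList (bookmarks.map pvKey) := by
    rw [hd, PySem.Dict.keys_foldl_modify_key]
    simp [PySem.Set.ofList_eq_foldl, PySem.Set.update]
  have hget : ∀ c, d.getD c [] = bookmarks.filter (fun bm => pvKey bm == c) := by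
    intro c
    have h := PySem.Dict.getD_foldl_modify_append
      (l := bookmarks.map (fun bm => (pvKey bm, bm)))
      (d := (PySem.Dict.empty : PySem.Dict String (List (List (String × String))))) (c := c)
    rw [List.foldl_map] at h
    simpa [List.filter_map, Function.comp_def] using h
  rw [PySem.Dict.items_eq_map_keys d hnd [], hkeys]
  exact List.map_congr_left (fun k _ => by rw [hget])

-- ===== VERDICT (by name: the statement is the Claim_ definition above) =====
theorem group_by_browser_spec : Claim_equal_group_by_browser := by
  intro bookmarks _ _
  show group_by_browser bookmarks = group_by_browser_alt bookmarks
  have h := groups_items bookmarks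
  simp only [pvKey] at h
  simp only [group_by_browser, group_by_browser_alt]
  rw [h]
  simp only [List.map_map]
  apply PySem.List.sorted_eq_of_perm_of_pairwise_lt
  · exact List.Perm.map _ (PySem.List.sorted_perm _ _ _)
  · exact List.Pairwise.map _ (fun a b hab => hab) (PySem.List.sorted_ofList_pairwise_lt _)
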